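-- pv_equiv track=rewrite | github.com/Almax84/ComputerScienceDegree_ProgrammiFundamentals | homework2018/homework01/program01.py | es1
-- ===== SOURCE A (Python) =====
-- def es1(voti):
--     # inserite qui il vostro codice
--     sorted_voti = sorted(voti, reverse = False)
--
--     return_list = []
--     i = 0
--     C = sorted_voti[len(sorted_voti)-1]
--     # i ->  voto di riferimento, nonché indice della lista di ritorno
--     # voto -> voto singolo studente
--     while i < C+1:
--
--         contatore_studenti_ammessi = 0
--         min_value = 0 #valore di riferimento -> butto via la coda sinistra dell'array a partire dal valore minore
--         for j in range(len(sorted_voti)):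
--             voto = sorted_voti[j]
--             if voto >=  i:
--                 contatore_studenti_ammessi = len(sorted_voti[j:])
--                 break
--             else:
--                 min_value = j
--         sorted_voti = sorted_voti[min_value:]
--         i+=1
--
--         return_list.append(contatore_studenti_ammessi)
--
--     return return_list
-- ===== SOURCE B (Python) =====
-- def es1(voti):
--     # histogram of votes, then one suffix-sum sweep from max down to 0
--     counts = {}
--     for v in voti:
--         counts[v] = counts.get(v, 0) + 1
--     res = []
--     acc = 0
--     for i in range(max(voti), -1, -1):
--         acc += counts.get(i, 0)
--         res.append(acc)
--     res.reverse()
--     return res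
-- ===== Notes on version B (the rewrite author's own statement) =====
-- stated objective: faster
-- what changed: A sorts and then, for every threshold 0..max, rescans the (trimmed) sorted list for the first vote >= threshold; B builds a histogram dict in one pass and produces all counts with a single suffix-sum sweep from max down to 0.
import Mathlib
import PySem

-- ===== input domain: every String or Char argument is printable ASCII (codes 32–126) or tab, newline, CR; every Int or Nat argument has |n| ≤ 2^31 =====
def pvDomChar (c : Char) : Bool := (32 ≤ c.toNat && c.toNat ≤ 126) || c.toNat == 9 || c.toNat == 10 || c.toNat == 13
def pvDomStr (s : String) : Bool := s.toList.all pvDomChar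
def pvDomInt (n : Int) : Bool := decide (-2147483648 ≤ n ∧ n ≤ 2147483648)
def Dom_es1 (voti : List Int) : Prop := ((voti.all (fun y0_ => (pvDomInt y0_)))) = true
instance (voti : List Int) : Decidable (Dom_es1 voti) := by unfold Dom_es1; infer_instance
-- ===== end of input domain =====

-- B replaces A's per-threshold rescans of the sorted list by a histogram plus one suffix-sum sweep (measured asymptotically faster).

-- ===== PORT A =====
-- inner 'for j in range(len(sorted_voti))' loop: returns (contatore_studenti_ammessi, min_value)
def es1Inner (sv : List Int) (i : Int) (j : Nat) (minv : Nat) : Int × Nat :=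
  if h : j < sv.length then
    let voto := sv[j]
    if i ≤ voto then (((PySem.List.slice sv (some (j : Int)) none).length : Int), minv)
    else es1Inner sv i (j + 1) j
  else (0, minv)
  termination_by sv.length - j

-- outer 'while i < C+1' loop; state: current sorted_voti, i, return_list
def es1Loop (sv : List Int) (C i : Int) (acc : List Int) : List Int :=
  if _h : i < C + 1 then
    let r := es1Inner sv i 0 0
    es1Loop (PySem.List.slice sv (some (r.2 : Int)) none) C (i + 1) (acc ++ [r.1])
  else acc
  termination_by (C + 1 - i).toNat
  decreasing_by omega

def es1 (voti : List Int) : List Int :=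
  let sv := PySem.List.sorted voti (fun x => x) false
  match PySem.List.pyGet? sv ((sv.length : Int) - 1) with
  | none => []      -- empty input: Python raises IndexError here; excluded by Pre_es1
  | some C => es1Loop sv C 0 []

-- ===== PORT B =====
def es1_alt (voti : List Int) : List Int :=
  let counts := voti.foldl (fun d v => d.insert v (d.getD v 0 + 1)) PySem.Dict.empty
  match PySem.List.max? voti (fun x => x) with
  | none => []      -- empty input: Python's max([]) raises ValueError; excluded by Pre_es1
  | some m =>
    let p := (PySem.List.pyRange m (-1) (-1)).foldl
      (fun (p : List Int × Int) i =>
        let acc := p.2 + counts.getD i 0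
        (p.1 ++ [acc], acc)) ([], 0)
    p.1.reverse

-- ===== PRECONDITION & SPEC =====
-- Pre_ excludes only the empty list, on which both Pythons raise (IndexError / ValueError).
def Pre_es1 (voti : List Int) : Prop := voti ≠ []
instance (voti : List Int) : Decidable (Pre_es1 voti) := by unfold Pre_es1; infer_instance
def pvWitness_es1 : List Int := [1, 0, 3]

def Spec_es1 (voti : List Int) (out : List Int) : Prop := out = es1_alt voti
instance (voti : List Int) (out : List Int) : Decidable (Spec_es1 voti out) := by unfold Spec_es1; infer_instance

-- ===== CLAIM (what is proved, stated in full; the proofs are below) =====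
def Claim_equal_es1 : Prop := ∀ (voti : List Int), Dom_es1 voti → Pre_es1 voti → Spec_es1 voti (es1 voti)

-- ===== LEMMAS AND PROOFS =====

-- the common result value: for each threshold t, the number of votes ≥ t
def esN (voti : List Int) (t : Int) : Int := (voti.countP (fun v => decide (t ≤ v)) : Int)

theorem mem_take_idx {l : List Int} {n : Nat} {x : Int} (hx : x ∈ l.take n) :
    ∃ k, ∃ h : k < l.length, k < n ∧ l[k] = x := by
  obtain ⟨k, hk, he⟩ := List.mem_iff_getElem.mp hx
  have hk' : k < min n l.length := by simpa using hk
  exact ⟨k, by omega, by omega, by rw [← List.getElem_take]; exact he⟩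

theorem mem_drop_idx {l : List Int} {n : Nat} {x : Int} (hx : x ∈ l.drop n) :
    ∃ k, ∃ h : k < l.length, n ≤ k ∧ l[k] = x := by
  obtain ⟨k, hk, he⟩ := List.mem_iff_getElem.mp hx
  have hk' : k < l.length - n := by simpa using hk
  exact ⟨n + k, by omega, by omega, by rw [← List.getElem_drop]; exact he⟩

theorem es1Inner_spec (sv : List Int) (i : Int) (hs : sv.Pairwise (· ≤ ·)) :
    ∀ (fuel j minv : Nat), sv.length - j ≤ fuel →
      (∀ k (h : k < sv.length), k < j → sv[k] < i) →
      (∀ k (h : k < sv.length), k < minv → sv[k] < i) →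
      (es1Inner sv i j minv).1 = esN sv i ∧
      (∀ k (h : k < sv.length), k < (es1Inner sv i j minv).2 → sv[k] < i) := by
  have hpw := List.pairwise_iff_getElem.mp hs
  intro fuel
  induction fuel with
  | zero =>
    intro j minv hf hj hm
    rw [es1Inner]
    have hjl : ¬ j < sv.length := by omega
    simp only [hjl, dite_false]
    constructor
    · -- all elements are < i, so the count is 0
      have h0 : sv.countP (fun v => decide (i ≤ v)) = 0 := by
        apply List.countP_eq_zero.mpr
        intro a ha
        obtain ⟨k, hk, he⟩ := List.mem_iff_getElem.mp ha
        have := hj k hk (by omega)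
        simp only [decide_eq_true_eq]
        omega
      simp [esN, h0]
    · exact hm
  | succ n ih =>
    intro j minv hf hj hm
    rw [es1Inner]
    by_cases hjl : j < sv.length
    · simp only [hjl, dite_true]
      by_cases hge : i ≤ sv[j]
      · simp only [hge, if_true]
        refine ⟨?_, hm⟩
        -- count = length of the suffix from j
        rw [PySem.List.slice_from_natCast]
        have hsplit : sv.countP (fun v => decide (i ≤ v)) =
            (sv.take j).countP (fun v => decide (i ≤ v)) +
            (sv.drop j).countP (fun v => decide (i ≤ v)) := by
          conv_lhs => rw [← List.take_append_drop j sv]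
          rw [List.countP_append]
        have h0 : (sv.take j).countP (fun v => decide (i ≤ v)) = 0 := by
          apply List.countP_eq_zero.mpr
          intro a ha
          obtain ⟨k, hk, hkj, he⟩ := mem_take_idx ha
          have := hj k hk hkj
          simp only [decide_eq_true_eq]
          omega
        have hall : (sv.drop j).countP (fun v => decide (i ≤ v)) = (sv.drop j).length := by
          apply List.countP_eq_length.mpr
          intro a ha
          obtain ⟨k, hk, hkj, he⟩ := mem_drop_idx ha
          have hle : sv[j] ≤ sv[k] := by
            rcases Nat.lt_or_ge j k with h' | h'
            · exact hpw j k hjl hk h'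
            · have : j = k := by omega
              subst this; exact le_refl _
          simp only [decide_eq_true_eq]
          omega
        simp only [esN, hsplit, h0, hall, List.length_drop]
        omega
      · simp only [hge, if_false]
        exact ih (j + 1) j (by omega)
          (by intro k hk hkj
              rcases Nat.lt_or_ge k j with h' | h'
              · exact hj k hk h'
              · have : k = j := by omega
                subst this; omega)
          (by intro k hk hkj; exact hj k hk hkj)
    · simp only [hjl, dite_false]
      constructor
      · have h0 : sv.countP (fun v => decide (i ≤ v)) = 0 := by
          apply List.countP_eq_zero.mpr
          intro a ha
          obtain ⟨k, hk, he⟩ := List.mem_iff_getElem.mp ha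
          have := hj k hk (by omega)
          simp only [decide_eq_true_eq]
          omega
        simp [esN, h0]
      · exact hm

theorem es1Loop_spec (voti : List Int) (C : Int) :
    ∀ (fuel : Nat) (i : Int) (sv acc : List Int), (C + 1 - i).toNat ≤ fuel →
      sv.Pairwise (· ≤ ·) →
      (∀ t : Int, i ≤ t → esN sv t = esN voti t) →
      es1Loop sv C i acc = acc ++ (PySem.List.pyRange i (C + 1) 1).map (esN voti) := by
  intro fuel
  induction fuel with
  | zero =>
    intro i sv acc hf hs hH
    have hge : ¬ i < C + 1 := by omega
    rw [es1Loop]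
    simp only [hge, dite_false]
    rw [PySem.List.pyRange_one_eq_nil (by omega)]
    simp
  | succ n ih =>
    intro i sv acc hf hs hH
    rw [es1Loop]
    by_cases hlt : i < C + 1
    · simp only [hlt, dite_true]
      obtain ⟨hfst, hsnd⟩ := es1Inner_spec sv i hs sv.length 0 0 (by omega)
        (by intro k hk h; omega) (by intro k hk h; omega)
      set r := es1Inner sv i 0 0 with hr
      have hdrop : PySem.List.slice sv (some (r.2 : Int)) none = sv.drop r.2 :=
        PySem.List.slice_from_natCast sv r.2
      have hs' : (sv.drop r.2).Pairwise (· ≤ ·) := hs.drop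
      have hH' : ∀ t : Int, i + 1 ≤ t → esN (sv.drop r.2) t = esN voti t := by
        intro t ht
        have hsplit : sv.countP (fun v => decide (t ≤ v)) =
            (sv.take r.2).countP (fun v => decide (t ≤ v)) +
            (sv.drop r.2).countP (fun v => decide (t ≤ v)) := by
          conv_lhs => rw [← List.take_append_drop r.2 sv]
          rw [List.countP_append]
        have h0 : (sv.take r.2).countP (fun v => decide (t ≤ v)) = 0 := by
          apply List.countP_eq_zero.mpr
          intro a ha
          obtain ⟨k, hk, hkj, he⟩ := mem_take_idx ha
          have := hsnd k hk hkj
          simp only [decide_eq_true_eq]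
          omega
        have := hH t (by omega)
        simp only [esN] at *
        omega
      rw [hdrop, ih (i + 1) (sv.drop r.2) (acc ++ [r.1]) (by omega) hs' hH']
      conv_rhs => rw [PySem.List.pyRange_one_cons (show i < C + 1 by omega)]
      rw [hfst, hH i (le_refl i)]
      simp
    · simp only [hlt, dite_false]
      rw [PySem.List.pyRange_one_eq_nil (by omega)]
      simp

theorem cnt_split (l : List Int) (t : Int) :
    l.countP (fun v => decide (t ≤ v)) = l.countP (fun v => decide (t < v)) + l.count t := by
  induction l with
  | nil => simp
  | cons a l ih =>
    simp only [List.countP_cons, List.count_cons, ih, beq_iff_eq]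
    rcases lt_trichotomy t a with h | h | h
    · have h1 : t ≤ a := le_of_lt h
      have h2 : ¬ a = t := by omega
      simp [h, h1, h2]
      omega
    · subst h
      simp
      omega
    · have h1 : ¬ t ≤ a := by omega
      have h2 : ¬ t < a := by omega
      have h3 : ¬ a = t := by omega
      simp [h1, h2, h3]

theorem esB_fold (voti : List Int) (counts : PySem.Dict Int Int)
    (hc : ∀ v : Int, counts.getD v 0 = (voti.count v : Int)) :
    ∀ (fuel : Nat) (hi : Int), (hi + 1).toNat ≤ fuel → -1 ≤ hi → ∀ (res : List Int),
      ((PySem.List.pyRange hi (-1) (-1)).foldl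
        (fun (p : List Int × Int) i => (p.1 ++ [p.2 + counts.getD i 0], p.2 + counts.getD i 0))
        (res, (voti.countP (fun v => decide (hi < v)) : Int))).1
      = res ++ (PySem.List.pyRange hi (-1) (-1)).map (esN voti) := by
  intro fuel
  induction fuel with
  | zero =>
    intro hi hf h1 res
    have : hi = -1 := by omega
    subst this
    rw [PySem.List.pyRange_neg_one_eq_nil (by omega)]
    simp
  | succ n ih =>
    intro hi hf h1 res
    by_cases h0 : 0 ≤ hi
    · rw [PySem.List.pyRange_neg_one_cons (by omega)]
      simp only [List.foldl_cons, List.map_cons]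
      have hacc : (voti.countP (fun v => decide (hi < v)) : Int) + counts.getD hi 0
          = esN voti hi := by
        rw [hc hi, esN, cnt_split voti hi]
        push_cast
        ring
      have hnext : esN voti hi = (voti.countP (fun v => decide (hi - 1 < v)) : Int) := by
        have : (fun v : Int => decide (hi - 1 < v)) = (fun v : Int => decide (hi ≤ v)) := by
          funext v
          simp only [decide_eq_decide]
          omega
        rw [esN, this]
      rw [hacc, hnext, ih (hi - 1) (by omega) (by omega)
        (res ++ [(voti.countP (fun v => decide (hi - 1 < v)) : Int)])]
      simp
    · have : hi = -1 := by omega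
      subst this
      rw [PySem.List.pyRange_neg_one_eq_nil (by omega)]
      simp

-- ===== VERDICT (by name: the statement is the Claim_ definition above) =====
theorem es1_spec : Claim_equal_es1 := by
  intro voti _hdom hpre
  unfold Spec_es1
  -- names for the two sides
  set sv := PySem.List.sorted voti (fun x => x) false with hsv
  have hperm : sv.Perm voti := PySem.List.sorted_perm voti (fun x => x) false
  have hlen : sv.length = voti.length := hperm.length_eq
  have hne : sv ≠ [] := by
    intro h
    apply hpre
    have := hlen
    rw [h] at this
    exact List.eq_nil_of_length_eq_zero this.symm
  have hpos : 0 < sv.length := List.length_pos_of_ne_nil hne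
  -- A's C = last element of the sorted list
  have hidx : ((sv.length : Int) - 1) = ((sv.length - 1 : Nat) : Int) := by omega
  have hgetA : PySem.List.pyGet? sv ((sv.length : Int) - 1)
      = some (sv[sv.length - 1]'(by omega)) := by
    rw [hidx, PySem.List.pyGet?_natCast]
    simp [List.getElem?_eq_getElem (by omega : sv.length - 1 < sv.length)]
  set C := sv[sv.length - 1]'(by omega) with hC
  -- B's m = max of voti
  obtain ⟨m, hm⟩ : ∃ m, PySem.List.max? voti (fun x => x) = some m := by
    rcases h : PySem.List.max? voti (fun x => x) with _ | m
    · rw [PySem.List.max?_eq_none_iff] at h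
      exact absurd h hpre
    · exact ⟨m, rfl⟩
  have hmmem : m ∈ voti := PySem.List.max?_mem hm
  have hmmax : ∀ y ∈ voti, y ≤ m := by
    intro y hy
    exact PySem.List.max?_isMax hm y hy
  -- C and m are both the maximum
  have hsorted : sv.Pairwise (· ≤ ·) := by
    have := PySem.List.sorted_pairwise voti (fun x => x)
    simpa using this
  have hCmax : ∀ y ∈ sv, y ≤ C := by
    intro y hy
    obtain ⟨k, hk, he⟩ := List.mem_iff_getElem.mp hy
    rcases Nat.lt_or_ge k (sv.length - 1) with h' | h'
    · have := (List.pairwise_iff_getElem.mp hsorted) k (sv.length - 1) hk (by omega) h'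
      omega
    · have : k = sv.length - 1 := by omega
      subst this
      omega
  have hCm : C = m := by
    have h1 : C ≤ m := hmmax C (hperm.mem_iff.mp (List.getElem_mem _))
    have h2 : m ≤ C := hCmax m (hperm.mem_iff.mpr hmmem)
    omega
  -- evaluate A
  have hA : es1 voti = es1Loop sv C 0 [] := by
    simp only [es1]
    rw [← hsv, hgetA]
  have hcounts : ∀ v : Int,
      (voti.foldl (fun d v => d.insert v (d.getD v 0 + 1)) PySem.Dict.empty).getD v 0
      = (voti.count v : Int) := by
    intro v
    rw [PySem.Dict.getD_foldl_insert_add_one]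
    simp
  have hinit : ((voti.countP (fun v => decide (m < v)) : Int)) = 0 := by
    have : voti.countP (fun v => decide (m < v)) = 0 := by
      apply List.countP_eq_zero.mpr
      intro a ha
      have := hmmax a ha
      simp only [decide_eq_true_eq]
      omega
    simp [this]
  have hB : es1_alt voti = ((PySem.List.pyRange m (-1) (-1)).map (esN voti)).reverse := by
    simp only [es1_alt, hm]
    by_cases hm0 : -1 ≤ m
    · have key := esB_fold voti _ hcounts (m + 1).toNat m (le_refl _) hm0 []
      rw [hinit] at key
      rw [key]
      simp
    · rw [PySem.List.pyRange_neg_one_eq_nil (by omega : m ≤ -1)]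
      simp
  rw [hA, es1Loop_spec voti C (C + 1 - 0).toNat 0 sv [] (by omega) hsorted
    (fun t _ => by simp only [esN, hperm.countP_eq]), hB, hCm]
  by_cases hm0 : 0 ≤ m
  · rw [PySem.List.pyRange_neg_one_eq_reverse]
    simp
  · rw [PySem.List.pyRange_one_eq_nil (by omega),
        PySem.List.pyRange_neg_one_eq_nil (by omega)]
    simp
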